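-- pv_equiv track=rewrite | github.com/navin251285/helloagent | fix_notebooks.py | extract_markdown_and_code
-- ===== SOURCE A (Python) =====
-- def extract_markdown_and_code(cell_source):
--     """Extract commented markdown and remaining code from a cell."""
--     source_str = ''.join(cell_source) if isinstance(cell_source, list) else cell_source
--     lines = source_str.split('\n')
--
--     markdown_lines = []
--     code_lines = []
--     in_markdown = True
--
--     for line in lines:
--         stripped = line.lstrip()
--
--         # Lines starting with # are comments/markdown
--         if stripped.startswith('#'):
--             if in_markdown:
--                 # Extract markdown content after #
--                 if stripped == '#':
--                     markdown_lines.append('')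
--                 else:
--                     # Remove # and handle both '# text' and '#text'
--                     content = stripped[1:].lstrip() if stripped.startswith('# ') else stripped[1:]
--                     markdown_lines.append(content)
--         elif stripped == '':
--             # Empty line
--             if in_markdown:
--                 markdown_lines.append('')
--             else:
--                 code_lines.append(line)
--         else:
--             # Non-comment line = code starts
--             in_markdown = False
--             code_lines.append(line)
--
--     # Clean up markdown: remove trailing empty lines
--     while markdown_lines and markdown_lines[-1] == '':
--         markdown_lines.pop()
--
--     # Clean up code: remove leading empty lines
--     while code_lines and code_lines[0].strip() == '':
--         code_lines.pop(0)
--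
--     markdown_text = '\n'.join(markdown_lines)
--     code_text = '\n'.join(code_lines)
--
--     return markdown_text, code_text
-- ===== SOURCE B (Python) =====
-- def _md_content(line):
--     stripped = line.lstrip()
--     if stripped == '#':
--         return ''
--     return stripped[1:].lstrip() if stripped.startswith('# ') else stripped[1:]
--
--
-- def _is_md_line(line):
--     s = line.lstrip()
--     return s == '' or s.startswith('#')
--
--
-- def extract_markdown_and_code(cell_source):
--     """Extract commented markdown and remaining code from a cell."""
--     source_str = ''.join(cell_source) if isinstance(cell_source, list) else cell_source
--     lines = source_str.split('\n')
--     # split point: first line that is neither blank nor a comment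
--     i = next((k for k, line in enumerate(lines) if not _is_md_line(line)), len(lines))
--     markdown_lines = [_md_content(line) for line in lines[:i]]
--     code_lines = [line for line in lines[i:] if not line.lstrip().startswith('#')]
--     while markdown_lines and markdown_lines[-1] == '':
--         markdown_lines.pop()
--     while code_lines and code_lines[0].strip() == '':
--         code_lines.pop(0)
--     return '\n'.join(markdown_lines), '\n'.join(code_lines)
-- ===== Notes on version B (the rewrite author's own statement) =====
-- stated objective: simpler
-- what changed: Replaces A's single stateful loop with an in_markdown flag by a direct decomposition: find the split index (first non-blank non-comment line), map a content extractor over the prefix and filter comments out of the suffix, then the same cleanup loops.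
import Mathlib
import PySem

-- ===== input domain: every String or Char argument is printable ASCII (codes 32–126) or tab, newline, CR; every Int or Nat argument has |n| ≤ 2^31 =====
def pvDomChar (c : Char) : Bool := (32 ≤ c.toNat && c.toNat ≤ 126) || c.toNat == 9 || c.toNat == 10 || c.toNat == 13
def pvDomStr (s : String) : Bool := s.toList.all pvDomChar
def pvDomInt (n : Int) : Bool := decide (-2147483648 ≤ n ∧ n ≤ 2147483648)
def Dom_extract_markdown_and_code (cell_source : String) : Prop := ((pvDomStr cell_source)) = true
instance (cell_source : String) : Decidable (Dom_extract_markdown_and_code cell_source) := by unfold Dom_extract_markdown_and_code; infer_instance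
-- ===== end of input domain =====

-- ===== PORT A =====
-- B changes only the decomposition (split index + map/filter instead of a stateful loop); return values are proved equal on all of Dom.
-- shared helpers: the two cleanup loops both Pythons run verbatim
def pvDropTrailingEmpty : List String → List String
  | [] => []
  | x :: rest =>
      let r := pvDropTrailingEmpty rest
      if r = [] ∧ x = "" then [] else x :: r

def pvDropLeadingBlank : List String → List String
  | [] => []
  | x :: rest => if PySem.Str.strip x = "" then pvDropLeadingBlank rest else x :: rest

-- A's for-loop over the lines with the in_markdown flag
def pvLoopA : List String → List String → List String → Bool → List String × List String
  | [], md, code, _ => (md, code)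
  | line :: rest, md, code, inMd =>
      let stripped := PySem.Str.lstrip line
      if PySem.Str.startswith stripped "#" then
        if inMd then
          if stripped = "#" then pvLoopA rest (md ++ [""]) code inMd
          else
            let content := if PySem.Str.startswith stripped "# " then
                PySem.Str.lstrip (PySem.Str.slice stripped (some 1) none)
              else PySem.Str.slice stripped (some 1) none
            pvLoopA rest (md ++ [content]) code inMd
        else pvLoopA rest md code inMd
      else if stripped = "" then
        if inMd then pvLoopA rest (md ++ [""]) code inMd
        else pvLoopA rest md (code ++ [line]) inMd
      else pvLoopA rest md (code ++ [line]) false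

def extract_markdown_and_code (cell_source : String) : String × String :=
  let lines := (PySem.Str.split? cell_source "\n").getD []   -- sep = "\n" ≠ "", so never none
  let r := pvLoopA lines [] [] true
  (PySem.Str.join "\n" (pvDropTrailingEmpty r.1), PySem.Str.join "\n" (pvDropLeadingBlank r.2))

-- ===== PORT B =====
def pvIsMdLine (line : String) : Bool :=
  let s := PySem.Str.lstrip line
  s = "" || PySem.Str.startswith s "#"

def pvMdContent (line : String) : String :=
  let stripped := PySem.Str.lstrip line
  if stripped = "#" then ""
  else if PySem.Str.startswith stripped "# " then PySem.Str.lstrip (PySem.Str.slice stripped (some 1) none)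
  else PySem.Str.slice stripped (some 1) none

def extract_markdown_and_code_alt (cell_source : String) : String × String :=
  let lines := (PySem.Str.split? cell_source "\n").getD []   -- sep = "\n" ≠ "", so never none
  -- lines[:i] / lines[i:] at the first index failing pvIsMdLine = takeWhile / dropWhile
  let markdown_lines := (lines.takeWhile pvIsMdLine).map pvMdContent
  let code_lines := (lines.dropWhile pvIsMdLine).filter
      (fun line => !(PySem.Str.startswith (PySem.Str.lstrip line) "#"))
  (PySem.Str.join "\n" (pvDropTrailingEmpty markdown_lines),
   PySem.Str.join "\n" (pvDropLeadingBlank code_lines))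

-- ===== PRECONDITION & SPEC =====
def Spec_extract_markdown_and_code (cell_source : String) (out : String × String) : Prop := out = extract_markdown_and_code_alt cell_source
instance (cell_source : String) (out : String × String) : Decidable (Spec_extract_markdown_and_code cell_source out) := by unfold Spec_extract_markdown_and_code; infer_instance

-- ===== CLAIM (what is proved, stated in full; the proofs are below) =====
def Claim_equal_extract_markdown_and_code : Prop := ∀ (cell_source : String), Dom_extract_markdown_and_code cell_source → Spec_extract_markdown_and_code cell_source (extract_markdown_and_code cell_source)

-- ===== LEMMAS AND PROOFS =====
theorem pvMdContent_of_blank (line : String) (h : PySem.Str.lstrip line = "") :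
    pvMdContent line = "" := by
  unfold pvMdContent; rw [h]; decide

theorem pvMdContent_of_hash (line : String) (h : PySem.Str.lstrip line = "#") :
    pvMdContent line = "" := by
  unfold pvMdContent; rw [h]; decide

theorem pvLoopA_false (lines : List String) (md code : List String) :
    pvLoopA lines md code false =
      (md, code ++ lines.filter (fun l => !(PySem.Str.startswith (PySem.Str.lstrip l) "#"))) := by
  induction lines generalizing code with
  | nil => simp [pvLoopA]
  | cons line rest ih =>
    by_cases hc : PySem.Str.startswith (PySem.Str.lstrip line) "#" = true
    · simp only [(by decide : PySem.Str.startswith "" "#" = false),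
          (by decide : PySem.Str.startswith "#" "#" = true),
          (by decide : PySem.Str.startswith "" "# " = false),
          (by decide : ¬ ("" : String) = "#"), (by decide : ¬ ("#" : String) = ""),
          (by decide : PySem.Str.slice "" (some 1) = ""),
          Bool.false_eq_true, Bool.not_false, Bool.not_true, eq_self_iff_true,
          if_false, if_true, pvLoopA, hc, if_true, List.filter_cons, Bool.not_true, Bool.false_eq_true,
        if_false, ih]
    · have hb : PySem.Str.startswith (PySem.Str.lstrip line) "#" = false := Bool.eq_false_iff.mpr hc
      by_cases he : PySem.Str.lstrip line = ""
      · simp only [(by decide : PySem.Str.startswith "" "#" = false),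
          (by decide : PySem.Str.startswith "#" "#" = true),
          (by decide : PySem.Str.startswith "" "# " = false),
          (by decide : ¬ ("" : String) = "#"), (by decide : ¬ ("#" : String) = ""),
          (by decide : PySem.Str.slice "" (some 1) = ""),
          Bool.false_eq_true, Bool.not_false, Bool.not_true, eq_self_iff_true,
          if_false, if_true, pvLoopA, hc, he, if_true, ih, List.filter_cons, hb, Bool.not_false,
          List.append_assoc, List.singleton_append]
      · simp only [(by decide : PySem.Str.startswith "" "#" = false),
          (by decide : PySem.Str.startswith "#" "#" = true),
          (by decide : PySem.Str.startswith "" "# " = false),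
          (by decide : ¬ ("" : String) = "#"), (by decide : ¬ ("#" : String) = ""),
          (by decide : PySem.Str.slice "" (some 1) = ""),
          Bool.false_eq_true, Bool.not_false, Bool.not_true, eq_self_iff_true,
          if_false, if_true, pvLoopA, hc, he, ih, List.filter_cons, hb, Bool.not_false,
          List.append_assoc, List.singleton_append]

theorem pvLoopA_true (lines : List String) (md code : List String) :
    pvLoopA lines md code true =
      (md ++ (lines.takeWhile pvIsMdLine).map pvMdContent,
       code ++ (lines.dropWhile pvIsMdLine).filter
         (fun l => !(PySem.Str.startswith (PySem.Str.lstrip l) "#"))) := by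
  induction lines generalizing md with
  | nil => simp [pvLoopA]
  | cons line rest ih =>
    by_cases hc : PySem.Str.startswith (PySem.Str.lstrip line) "#" = true
    · have hmd : pvIsMdLine line = true := by simp only [pvIsMdLine, hc, Bool.or_true]
      by_cases hh : PySem.Str.lstrip line = "#"
      · simp only [(by decide : PySem.Str.startswith "" "#" = false),
          (by decide : PySem.Str.startswith "#" "#" = true),
          (by decide : PySem.Str.startswith "" "# " = false),
          (by decide : ¬ ("" : String) = "#"), (by decide : ¬ ("#" : String) = ""),
          (by decide : PySem.Str.slice "" (some 1) = ""),
          Bool.false_eq_true, Bool.not_false, Bool.not_true, eq_self_iff_true,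
          if_false, if_true, pvLoopA, hc, if_true, hh, ih, List.takeWhile_cons, List.dropWhile_cons,
          hmd, List.map_cons, pvMdContent_of_hash line hh, List.append_assoc,
          List.singleton_append]
      · have hcontent :
            (if PySem.Str.startswith (PySem.Str.lstrip line) "# " = true then
                PySem.Str.lstrip (PySem.Str.slice (PySem.Str.lstrip line) (some 1))
              else PySem.Str.slice (PySem.Str.lstrip line) (some 1)) = pvMdContent line := by
          unfold pvMdContent
          rw [if_neg hh]
        simp only [(by decide : PySem.Str.startswith "" "#" = false),
          (by decide : PySem.Str.startswith "#" "#" = true),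
          (by decide : PySem.Str.startswith "" "# " = false),
          (by decide : ¬ ("" : String) = "#"), (by decide : ¬ ("#" : String) = ""),
          (by decide : PySem.Str.slice "" (some 1) = ""),
          Bool.false_eq_true, Bool.not_false, Bool.not_true, eq_self_iff_true,
          if_false, if_true, pvLoopA, hc, if_true, hh, if_false, ih, hcontent, List.takeWhile_cons,
          List.dropWhile_cons, hmd, List.map_cons, List.append_assoc, List.singleton_append]
    · have hb : PySem.Str.startswith (PySem.Str.lstrip line) "#" = false := Bool.eq_false_iff.mpr hc
      by_cases he : PySem.Str.lstrip line = ""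
      · have hmd : pvIsMdLine line = true := by
          simp only [pvIsMdLine, he, decide_eq_true_eq]
          simp
        simp only [(by decide : PySem.Str.startswith "" "#" = false),
          (by decide : PySem.Str.startswith "#" "#" = true),
          (by decide : PySem.Str.startswith "" "# " = false),
          (by decide : ¬ ("" : String) = "#"), (by decide : ¬ ("#" : String) = ""),
          (by decide : PySem.Str.slice "" (some 1) = ""),
          Bool.false_eq_true, Bool.not_false, Bool.not_true, eq_self_iff_true,
          if_false, if_true, pvLoopA, hc, he, if_true, ih, List.takeWhile_cons, List.dropWhile_cons,
          hmd, List.map_cons, pvMdContent_of_blank line he, List.append_assoc,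
          List.singleton_append]
      · have hmd : pvIsMdLine line = false := by
          simp only [pvIsMdLine, hb, Bool.or_false]
          simp [he]
        simp only [(by decide : PySem.Str.startswith "" "#" = false),
          (by decide : PySem.Str.startswith "#" "#" = true),
          (by decide : PySem.Str.startswith "" "# " = false),
          (by decide : ¬ ("" : String) = "#"), (by decide : ¬ ("#" : String) = ""),
          (by decide : PySem.Str.slice "" (some 1) = ""),
          Bool.false_eq_true, Bool.not_false, Bool.not_true, eq_self_iff_true,
          if_false, if_true, pvLoopA, hc, he, pvLoopA_false, List.takeWhile_cons, List.dropWhile_cons,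
          hmd, Bool.false_eq_true, if_false, List.filter_cons, hb, Bool.not_false, if_true,
          List.map_nil, List.append_nil, List.append_assoc, List.singleton_append]

-- ===== VERDICT (by name: the statement is the Claim_ definition above) =====
theorem extract_markdown_and_code_spec : Claim_equal_extract_markdown_and_code := by
  intro cs _
  show extract_markdown_and_code cs = extract_markdown_and_code_alt cs
  simp only [extract_markdown_and_code, extract_markdown_and_code_alt, pvLoopA_true,
    List.nil_append]
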